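-- pv_equiv track=rewrite | github.com/vikasmunshi/euler | solutions/0/0/8/1/solve_path_sum_two_ways_p0081_s0.py | move_diagonally
-- ===== SOURCE A (Python) =====
-- from typing import Generator, List
--
-- def move_diagonally(size: int) -> Generator[tuple[int, int], None, None]:
--     row, col = (size - 1, size - 1)
--     while row >= 0:
--         yield (row, col)
--         row, col = (row - 1, col + 1)
--         if row < 0:
--             row, col = (col - 2, 0)
--         if col >= size:
--             col, row = (row, size - 1)
-- ===== SOURCE B (Python) =====
-- from typing import Generator
--
-- def move_diagonally(size: int) -> Generator[tuple[int, int], None, None]: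
--     for s in range(2 * (size - 1), -1, -1):
--         for row in range(min(size - 1, s), max(0, s - (size - 1)) - 1, -1):
--             yield (row, s - row)
-- ===== Notes on version B (the rewrite author's own statement) =====
-- stated objective: simpler
-- what changed: Replaces A's single self-mutating (row,col) pointer walk with its two reset rules by an explicit nested loop over anti-diagonals in decreasing sum, rows descending within each diagonal.
import Mathlib
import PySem

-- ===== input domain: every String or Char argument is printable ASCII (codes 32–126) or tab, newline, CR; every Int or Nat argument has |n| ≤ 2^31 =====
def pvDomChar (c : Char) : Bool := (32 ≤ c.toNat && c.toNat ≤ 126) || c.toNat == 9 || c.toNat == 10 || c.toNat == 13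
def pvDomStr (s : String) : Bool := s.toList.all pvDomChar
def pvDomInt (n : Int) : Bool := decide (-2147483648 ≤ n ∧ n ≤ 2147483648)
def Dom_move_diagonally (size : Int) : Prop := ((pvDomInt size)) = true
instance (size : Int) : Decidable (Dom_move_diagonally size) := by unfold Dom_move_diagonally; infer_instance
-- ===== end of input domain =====

-- B replaces A's single self-mutating (row, col) pointer walk by a plain nested loop over
-- anti-diagonals (decreasing sum) and rows (descending) within each diagonal: simpler.

-- ===== PORT A =====
-- A's while-loop, transliterated with a fuel counter large enough for its exactly size^2
-- iterations (the loop yields once per iteration and visits each of the size^2 cells once).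
def pvLoopA (size : Int) : Nat → Int → Int → List (Int × Int)
  | 0, _, _ => []
  | fuel + 1, row, col =>
    if row < 0 then []
    else
      (row, col) ::
      (let row1 := row - 1
       let col1 := col + 1
       let row2 := if row1 < 0 then col1 - 2 else row1
       let col2 := if row1 < 0 then 0 else col1
       let row3 := if col2 ≥ size then size - 1 else row2
       let col3 := if col2 ≥ size then row2 else col2
       pvLoopA size fuel row3 col3)

def move_diagonally (size : Int) : List (Int × Int) :=
  pvLoopA size (2 * size.toNat * size.toNat + 1) (size - 1) (size - 1)

-- ===== PORT B =====
-- rows of anti-diagonal s, descending: range(min(size-1, s), max(0, s-(size-1)) - 1, -1)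
def pvDiagRows (size s : Int) : List (Int × Int) :=
  (PySem.List.pyRange (min (size - 1) s) (max 0 (s - (size - 1)) - 1) (-1)).map
    (fun row => (row, s - row))

def move_diagonally_alt (size : Int) : List (Int × Int) :=
  (PySem.List.pyRange (2 * (size - 1)) (-1) (-1)).flatMap (fun s => pvDiagRows size s)

-- ===== PRECONDITION & SPEC =====
def Spec_move_diagonally (size : Int) (out : List (Int × Int)) : Prop := out = move_diagonally_alt size
instance (size : Int) (out : List (Int × Int)) : Decidable (Spec_move_diagonally size out) := by unfold Spec_move_diagonally; infer_instance

-- ===== CLAIM (what is proved, stated in full; the proofs are below) =====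
def Claim_equal_move_diagonally : Prop := ∀ (size : Int), Dom_move_diagonally size → Spec_move_diagonally size (move_diagonally size)

-- ===== LEMMAS AND PROOFS =====

-- diagonals s down to 0, concatenated (Nat-indexed recursion helper for the proof)
def pvTail (n : Int) : Nat → List (Int × Int)
  | 0 => pvDiagRows n 0
  | k + 1 => pvDiagRows n (k + 1) ++ pvTail n k

theorem pvLoopA_neg (size : Int) (fuel : Nat) (row col : Int) (h : row < 0) :
    pvLoopA size fuel row col = [] := by
  cases fuel with
  | zero => rfl
  | succ f => simp [pvLoopA, h]

theorem pvTail_int (n s : Int) (h : 0 ≤ s) :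
    pvTail n s.toNat = pvDiagRows n s ++ (if 1 ≤ s then pvTail n (s - 1).toNat else []) := by
  lift s to ℕ using h
  cases s with
  | zero => simp [pvTail]
  | succ k =>
    have h1 : (1 : Int) ≤ (k + 1 : ℕ) := by exact_mod_cast Nat.succ_le_succ (Nat.zero_le k)
    have h2 : ((k + 1 : ℕ) : Int) - 1 = (k : ℕ) := by push_cast; ring
    simp [pvTail]

theorem pvFlat (n s : Int) (h : 0 ≤ s) :
    (PySem.List.pyRange s (-1) (-1)).flatMap (fun t => pvDiagRows n t) = pvTail n s.toNat := by
  lift s to ℕ using h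
  induction s with
  | zero =>
    rw [PySem.List.pyRange_neg_one_cons (by norm_num)]
    rw [PySem.List.pyRange_neg_one_eq_nil (by norm_num)]
    simp [pvTail]
  | succ k ih =>
    rw [PySem.List.pyRange_neg_one_cons (by exact_mod_cast Int.lt_of_lt_of_le (by norm_num) (Int.natCast_nonneg (k+1)))]
    have h2 : ((k + 1 : ℕ) : Int) - 1 = (k : ℕ) := by push_cast; ring
    rw [h2]
    simp only [List.flatMap_cons] at *
    rw [ih]
    rfl

-- the main simulation lemma: from a valid state (row, s - row) on diagonal s, A's loop
-- produces the rest of diagonal s (rows descending) followed by all lower diagonals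
theorem pvMain (fuel : Nat) : ∀ (n s row : Int), 1 ≤ n → 0 ≤ s → s ≤ 2 * (n - 1) →
    max 0 (s - (n - 1)) ≤ row → row ≤ min (n - 1) s → row + 1 + s * n ≤ (fuel : Int) →
    pvLoopA n fuel row (s - row) =
      (PySem.List.pyRange row (max 0 (s - (n - 1)) - 1) (-1)).map (fun r => (r, s - r)) ++
        (if 1 ≤ s then pvTail n (s - 1).toNat else []) := by
  induction fuel with
  | zero =>
    intro n s row hn hs0 hs2 hlo hhi hf
    exfalso
    have hsn : 0 ≤ s * n := mul_nonneg hs0 (by omega)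
    have hr0 : 0 ≤ row := by omega
    simp only [Nat.cast_zero] at hf
    linarith
  | succ fuel ih =>
    intro n s row hn hs0 hs2 hlo hhi hf
    have hrow0 : ¬ (row < 0) := by omega
    have hsn : 0 ≤ s * n := mul_nonneg hs0 (by omega)
    push_cast at hf
    rw [pvLoopA]
    simp only [hrow0, if_false]
    rw [PySem.List.pyRange_neg_one_cons (by omega)]
    by_cases h1 : row - 1 < 0
    · -- row = 0, top of grid; diagonal s ≤ n - 1 ends, jump to (s-1, 0)
      have hr : row = 0 := by omega
      have hsle : s ≤ n - 1 := by omega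
      simp only [h1, if_true]
      have hc2 : ¬ ((0 : Int) ≥ n) := by omega
      simp only [hc2, if_false]
      subst hr
      by_cases hs1 : (1 : Int) ≤ s
      · have hfu : (s - 1) + 1 + (s - 1) * n ≤ (fuel : Int) := by linarith
        have hrec := ih n (s - 1) (s - 1) hn (by omega) (by omega) (by omega) (by omega) hfu
        rw [show s - 1 - (s - 1) = (0 : Int) from by ring] at hrec
        rw [show s - 0 + 1 - 2 = s - 1 from by ring, hrec]
        rw [PySem.List.pyRange_neg_one_eq_nil
          (show (0 : Int) - 1 ≤ max 0 (s - (n - 1)) - 1 from by omega)]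
        rw [pvTail_int n (s - 1) (by omega)]
        have hmin : min (n - 1) (s - 1) = s - 1 := by omega
        have hmax2 : max 0 (s - 1 - (n - 1)) = 0 := by omega
        simp [hs1, pvDiagRows, hmin]
      · have hs0' : s = 0 := by omega
        subst hs0'
        rw [pvLoopA_neg _ _ _ _ (by omega)]
        rw [PySem.List.pyRange_neg_one_eq_nil (by omega)]
        simp
    · simp only [h1, if_false]
      have hr1 : (1 : Int) ≤ row := by omega
      by_cases h2 : s - row + 1 ≥ n
      · -- right edge reached: diagonal s (s ≥ n) ends at row = s - n + 1, jump to (n-1, s-n)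
        have hrlo : row = s - n + 1 := by omega
        have hsge : n ≤ s := by omega
        have hc : (s - row) + 1 ≥ n := by omega
        simp only [hc, if_true]
        have hs1 : (1 : Int) ≤ s := by omega
        have hfu : (n - 1) + 1 + (s - 1) * n ≤ (fuel : Int) := by nlinarith
        have hrec := ih n (s - 1) (n - 1) hn (by omega) (by omega) (by omega) (by omega) hfu
        rw [show row - 1 = s - 1 - (n - 1) from by omega]
        rw [hrec]
        rw [PySem.List.pyRange_neg_one_eq_nil
          (show s - 1 - (n - 1) ≤ max 0 (s - (n - 1)) - 1 from by omega)]
        rw [pvTail_int n (s - 1) (by omega)]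
        have hmin : min (n - 1) (s - 1) = n - 1 := by omega
        simp [hs1, pvDiagRows, hmin]
      · -- interior step: move up the same diagonal to (row - 1, s - row + 1)
        have hc : ¬ ((s - row) + 1 ≥ n) := by omega
        simp only [hc, if_false]
        have hfu : (row - 1) + 1 + s * n ≤ (fuel : Int) := by linarith
        have hrec := ih n s (row - 1) hn hs0 hs2 (by omega) (by omega) hfu
        have hcol : (s - row) + 1 = s - (row - 1) := by ring
        rw [hcol, hrec]
        simp

-- ===== VERDICT (by name: the statement is the Claim_ definition above) =====
theorem move_diagonally_spec : Claim_equal_move_diagonally := by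
  intro size _
  unfold Spec_move_diagonally move_diagonally move_diagonally_alt
  by_cases hn : 1 ≤ size
  · have hcast : ((size.toNat : Int)) = size := Int.toNat_of_nonneg (by omega)
    have hfuel : (size - 1) + 1 + (2 * (size - 1)) * size ≤
        ((2 * size.toNat * size.toNat + 1 : Nat) : Int) := by
      push_cast [hcast]
      nlinarith
    have h := pvMain (2 * size.toNat * size.toNat + 1) size (2 * (size - 1)) (size - 1)
      hn (by omega) (by omega) (by omega) (by omega) hfuel
    have hcol : 2 * (size - 1) - (size - 1) = size - 1 := by ring
    rw [hcol] at h
    rw [h, pvFlat size (2 * (size - 1)) (by omega)]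
    rw [pvTail_int size (2 * (size - 1)) (by omega)]
    by_cases hs1 : (1 : Int) ≤ 2 * (size - 1)
    · have hmin : min (size - 1) (2 * (size - 1)) = size - 1 := by omega
      simp [hs1, pvDiagRows, hmin, hcol]
    · have hone : size = 1 := by omega
      subst hone
      decide
  · rw [pvLoopA_neg _ _ _ _ (by omega)]
    rw [PySem.List.pyRange_neg_one_eq_nil (by omega)]
    rfl
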